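-- pv_equiv track=rewrite | github.com/alexeybutyrev/leetcode-solutions | solutions/3751. Total Waviness of Numbers in Range I/solution.py | totalWaviness
-- ===== SOURCE A (Python) =====
-- def totalWaviness(num1: int, num2: int) -> int:
--     ans = 0
--     for x in range(num1,num2+1):
--
--         s = str(x)
--
--
--         if len(s) >= 3:
--             for j in range(2,len(s)):
--                 if (s[j-2] < s[j-1] > s[j] or s[j-2] > s[j-1] < s[j]):
--                     ans += 1
--     return ans
-- ===== SOURCE B (Python) =====
-- def _below(n, mod, start, width):
--     # how many integers in [0, n) have residue modulo `mod` inside [start, start+width)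
--     q, r = divmod(n, mod)
--     return q * width + min(max(r - start, 0), width)
--
--
-- def totalWaviness(num1: int, num2: int) -> int:
--     # Count, for every window of three consecutive digit positions, how many numbers of
--     # the range show each wavy 3-digit pattern there, using closed-form residue counting.
--     total = 0
--     base = 100  # place value of the top position of the current 3-digit window
--     while base <= num2:
--         lo = max(num1, base)  # the window exists only for numbers with enough digits
--         if lo <= num2:
--             unit = base // 100
--             mod = base * 10
--             for m in range(1000):
--                 if m // 100 < m // 10 % 10 > m % 10 or m // 100 > m // 10 % 10 < m % 10:
--                     total += _below(num2 + 1, mod, m * unit, unit) - _below(lo, mod, m * unit, unit)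
--         base *= 10
--     return total
-- ===== Notes on version B (the rewrite author's own statement) =====
-- stated objective: faster
-- what changed: B never iterates over the numbers of the range: for each 3-digit window position it counts, by a closed-form quotient/remainder formula, how many numbers in the range carry each of the wavy 3-digit patterns at that position; Pre_ excludes nonempty ranges reaching below -9, where A's count includes triples containing the '-' sign of str(x) compared as an ASCII character, outside the task's natural nonnegative domain.
-- outside the precondition, e.g. on totalWaviness(-321, -100): A returns 181, B returns 0
import Mathlib
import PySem

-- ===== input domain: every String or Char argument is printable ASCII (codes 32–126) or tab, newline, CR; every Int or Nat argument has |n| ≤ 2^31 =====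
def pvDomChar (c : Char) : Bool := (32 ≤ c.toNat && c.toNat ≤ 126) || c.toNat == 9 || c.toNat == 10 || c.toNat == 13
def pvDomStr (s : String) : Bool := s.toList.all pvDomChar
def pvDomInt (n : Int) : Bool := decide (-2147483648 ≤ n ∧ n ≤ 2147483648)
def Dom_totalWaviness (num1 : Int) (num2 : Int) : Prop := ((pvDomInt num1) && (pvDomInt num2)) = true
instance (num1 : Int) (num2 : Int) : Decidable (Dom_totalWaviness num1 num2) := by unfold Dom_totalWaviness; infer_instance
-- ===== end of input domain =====

-- B replaces A's per-number scan of the range by closed-form residue counting per 3-digit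
-- window position (asymptotically faster); Pre_ keeps to the task's nonnegative domain.


-- ===== PORT A =====
def totalWaviness (num1 : Int) (num2 : Int) : Int :=
  (PySem.List.pyRange num1 (num2 + 1) 1).foldl (fun ans x =>
    let s := PySem.Int.toChars x
    if 3 ≤ (s.length : Int) then
      (PySem.List.pyRange 2 (s.length : Int) 1).foldl (fun ans j =>
        if (PySem.List.pyGetD s (j - 2) ' ' < PySem.List.pyGetD s (j - 1) ' ' ∧
              PySem.List.pyGetD s (j - 1) ' ' > PySem.List.pyGetD s j ' ') ∨
           (PySem.List.pyGetD s (j - 2) ' ' > PySem.List.pyGetD s (j - 1) ' ' ∧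
              PySem.List.pyGetD s (j - 1) ' ' < PySem.List.pyGetD s j ' ')
        then ans + 1 else ans) ans
    else ans) 0

-- ===== PORT B =====
-- _below: numbers in [0, n) whose residue modulo `mod` lies in [start, start+width)
def pvBelow (n mod start width : Int) : Int :=
  let q := PySem.Int.floordiv n mod
  let r := PySem.Int.mod n mod
  q * width + min (max (r - start) 0) width

-- Source B's 'while base <= num2' loop; ported with fuel (the caller passes 64, so the port is
-- exact whenever num2 < 100·10^64, which holds throughout Dom_totalWaviness).
def pvLoopB (num1 num2 : Int) (fuel : Nat) (base total : Int) : Int :=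
  match fuel with
  | 0 => total
  | Nat.succ fuel =>
    if base ≤ num2 then
      let lo := max num1 base
      let total' :=
        if lo ≤ num2 then
          let unit := PySem.Int.floordiv base 100
          let md := base * 10
          (PySem.List.pyRange 0 1000 1).foldl (fun t m =>
            if (PySem.Int.floordiv m 100 < PySem.Int.mod (PySem.Int.floordiv m 10) 10 ∧
                PySem.Int.mod (PySem.Int.floordiv m 10) 10 > PySem.Int.mod m 10) ∨
               (PySem.Int.floordiv m 100 > PySem.Int.mod (PySem.Int.floordiv m 10) 10 ∧
                PySem.Int.mod (PySem.Int.floordiv m 10) 10 < PySem.Int.mod m 10)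
            then t + (pvBelow (num2 + 1) md (m * unit) unit - pvBelow lo md (m * unit) unit)
            else t) total
        else total
      pvLoopB num1 num2 fuel (base * 10) total'
    else total

def totalWaviness_alt (num1 : Int) (num2 : Int) : Int :=
  pvLoopB num1 num2 64 100 0

-- ===== PRECONDITION & SPEC =====
-- Pre_ excludes nonempty ranges reaching below -9: there A's count includes triples
-- containing the '-' sign of str(x) compared as an ASCII character, outside the task's
-- natural nonnegative domain (B counts digit triples of nonnegative numbers only).
def Pre_totalWaviness (num1 : Int) (num2 : Int) : Prop := -9 ≤ num1 ∨ num2 < num1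
instance (num1 : Int) (num2 : Int) : Decidable (Pre_totalWaviness num1 num2) := by
  unfold Pre_totalWaviness; infer_instance

def pvWitness_totalWaviness : Int × Int := (1, 250)

def Spec_totalWaviness (num1 : Int) (num2 : Int) (out : Int) : Prop := out = totalWaviness_alt num1 num2
instance (num1 : Int) (num2 : Int) (out : Int) : Decidable (Spec_totalWaviness num1 num2 out) := by unfold Spec_totalWaviness; infer_instance

-- ===== CLAIM (what is proved, stated in full; the proofs are below) =====
def Claim_equal_totalWaviness : Prop := ∀ (num1 : Int) (num2 : Int), Dom_totalWaviness num1 num2 → Pre_totalWaviness num1 num2 → Spec_totalWaviness num1 num2 (totalWaviness num1 num2)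

-- ===== LEMMAS AND PROOFS =====

-- local extremum tests, on digit values and on characters
def pvEx (a b c : Int) : Bool := (a < b && b > c) || (a > b && b < c)
def pvExC (a b c : Char) : Bool := (a < b && b > c) || (a > b && b < c)

-- number of wavy triples of a list, structurally
def pvTriV : List Int → Nat
  | a :: b :: c :: t => (if pvEx a b c then 1 else 0) + pvTriV (b :: c :: t)
  | _ => 0

def pvTriC : List Char → Nat
  | a :: b :: c :: t => (if pvExC a b c then 1 else 0) + pvTriC (b :: c :: t)
  | _ => 0

-- most-significant-first digit values of a nonnegative number
def pvDigits (n : Nat) : List Int :=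
  (if 10 ≤ n then pvDigits (n / 10) else []) ++ [((n % 10 : Nat) : Int)]
decreasing_by exact Nat.div_lt_self (by omega) (by omega)

-- waviness of n, recursively from the least-significant digit
def wavN (n : Nat) : Nat :=
  if n < 100 then 0
  else (if pvEx ((n / 100 % 10 : Nat) : Int) ((n / 10 % 10 : Nat) : Int) ((n % 10 : Nat) : Int)
        then 1 else 0) + wavN (n / 10)
decreasing_by exact Nat.div_lt_self (by omega) (by omega)

-- per-window sum specification
def pvS (num1 num2 : Int) (k : Nat) : Int :=
  ((PySem.List.pyRange num1 (num2 + 1) 1).map (fun x => (wavN (x.toNat / 10 ^ k) : Int))).sum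

-- the value of '-' or a digit as a char
def pvChr (d : Int) : Char := if d < 0 then '-' else Nat.digitChar d.toNat

lemma pvRange_shift (a b : Int) :
    PySem.List.pyRange (a + 1) (b + 1) 1 = (PySem.List.pyRange a b 1).map (· + 1) := by
  simp only [PySem.List.pyRange]
  norm_num
  intro k _
  omega

lemma pvGetD_cons {α : Type} (x : α) (l : List α) (i : Int) (d : α) (h : 1 ≤ i) :
    PySem.List.pyGetD (x :: l) i d = PySem.List.pyGetD l (i - 1) d := by
  rw [PySem.List.pyGetD_of_nonneg _ _ (by omega), PySem.List.pyGetD_of_nonneg _ _ (by omega)]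
  have : i.toNat = (i - 1).toNat + 1 := by omega
  rw [this, List.getD_cons_succ]

def pvP (s : List Char) (j : Int) : Bool :=
  pvExC (PySem.List.pyGetD s (j - 2) ' ') (PySem.List.pyGetD s (j - 1) ' ') (PySem.List.pyGetD s j ' ')

lemma pvCountA : ∀ s : List Char,
    (PySem.List.pyRange 2 (s.length : Int) 1).countP (pvP s) = pvTriC s := by
  intro s
  induction s using pvTriC.induct with
  | case1 a b c t ih =>
    have hlt : (2 : Int) < ((a :: b :: c :: t).length : Int) := by
      simp only [List.length_cons]; push_cast; omega
    rw [PySem.List.pyRange_one_cons hlt, List.countP_cons]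
    have h2 : pvP (a :: b :: c :: t) 2 = pvExC a b c := by
      unfold pvP
      rw [PySem.List.pyGetD_of_nonneg _ _ (by norm_num),
          PySem.List.pyGetD_of_nonneg _ _ (by norm_num),
          PySem.List.pyGetD_of_nonneg _ _ (by norm_num)]
      rfl
    have hlen : ((a :: b :: c :: t).length : Int) = ((b :: c :: t).length : Int) + 1 := by
      simp only [List.length_cons]; push_cast; ring
    have h3 : (PySem.List.pyRange (2 + 1) (((b :: c :: t).length : Int) + 1) 1).countP
        (pvP (a :: b :: c :: t)) = pvTriC (b :: c :: t) := by
      rw [pvRange_shift, List.countP_map, ← ih]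
      apply List.countP_congr
      intro j hj
      have hjb := PySem.List.mem_pyRange_one.mp hj
      suffices hsuf : pvP (a :: b :: c :: t) (j + 1) = pvP (b :: c :: t) j by
        simp only [Function.comp_apply]
        rw [hsuf]
      unfold pvP
      rw [show j + 1 - 2 = (j - 2) + 1 from by ring, show j + 1 - 1 = (j - 1) + 1 from by ring]
      rw [pvGetD_cons a (b :: c :: t) (j - 2 + 1) ' ' (by omega)]
      rw [show j - 2 + 1 - 1 = j - 2 from by ring]
      rw [pvGetD_cons a (b :: c :: t) (j - 1 + 1) ' ' (by omega)]
      rw [show j - 1 + 1 - 1 = j - 1 from by ring]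
      rw [pvGetD_cons a (b :: c :: t) (j + 1) ' ' (by omega)]
      rw [show j + 1 - 1 = j from by ring]
    rw [hlen, h3, h2]
    show pvTriC (b :: c :: t) + _ = pvTriC (a :: b :: c :: t)
    rw [pvTriC]
    exact Nat.add_comm _ _
  | case2 s hshape =>
    have hlen : s.length < 3 := by
      match s, hshape with
      | [], _ => simp
      | [a], _ => simp
      | [a, b], _ => simp
      | a :: b :: c :: t, h => exact absurd rfl (h a b c t)
    have : PySem.List.pyRange 2 (s.length : Int) 1 = [] := by
      simp [PySem.List.pyRange]
      omega
    rw [this]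
    match s, hshape with
    | [], _ => rfl
    | [a], _ => rfl
    | [a, b], _ => rfl
    | a :: b :: c :: t, h => exact absurd rfl (h a b c t)

lemma pvChr_natDigit (k : Nat) : pvChr ((k % 10 : Nat) : Int) = Nat.digitChar (k % 10) := by
  unfold pvChr
  rw [if_neg (by omega), Int.toNat_natCast]

set_option maxHeartbeats 1000000 in
lemma pvToDigitsCore : ∀ (f n : Nat) (ds : List Char), n < f →
    Nat.toDigitsCore 10 f n ds = (pvDigits n).map pvChr ++ ds := by
  intro f
  induction f with
  | zero => intro n ds h; omega
  | succ f ih =>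
    intro n ds h
    by_cases h10 : 10 ≤ n
    · have hne : n / 10 ≠ 0 := by omega
      have hstep : Nat.toDigitsCore 10 (f + 1) n ds
          = Nat.toDigitsCore 10 f (n / 10) (Nat.digitChar (n % 10) :: ds) := by
        simp [Nat.toDigitsCore, hne]
      rw [hstep, ih (n / 10) _ (by omega)]
      conv_rhs => rw [pvDigits]
      rw [if_pos h10, List.map_append]
      simp only [List.map_cons, List.map_nil, List.append_assoc, List.cons_append,
        List.nil_append, pvChr_natDigit]
    · have hz : n / 10 = 0 := by omega
      have hstep : Nat.toDigitsCore 10 (f + 1) n ds = Nat.digitChar (n % 10) :: ds := by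
        simp [Nat.toDigitsCore, hz]
      rw [hstep]
      conv_rhs => rw [pvDigits]
      rw [if_neg h10]
      simp only [List.nil_append, List.map_cons, List.map_nil, List.cons_append,
        pvChr_natDigit]

lemma pvToChars_eq (x : Int) :
    PySem.Int.toChars x
      = ((if x < 0 then (-1 : Int) :: pvDigits (-x).toNat else pvDigits x.toNat)).map pvChr := by
  by_cases hx : x < 0
  · simp only [PySem.Int.toChars, if_pos hx, Nat.toDigits]
    rw [pvToDigitsCore _ _ _ (Nat.lt_succ_self _), show x.natAbs = (-x).toNat from by omega]
    simp [pvChr]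
  · simp only [PySem.Int.toChars, if_neg hx, Nat.toDigits]
    rw [pvToDigitsCore _ _ _ (Nat.lt_succ_self _)]
    simp

lemma pvDigits_mem : ∀ (n : Nat), ∀ d ∈ pvDigits n, 0 ≤ d ∧ d ≤ 9 := by
  intro n
  induction n using pvDigits.induct with
  | _ n ih =>
    intro d hd
    rw [pvDigits] at hd
    rcases List.mem_append.mp hd with h | h
    · split at h
      · exact ih (by assumption) d h
      · simp at h
    · simp at h
      subst h
      constructor <;> omega

lemma pvDigitChar_toNat (k : Nat) (hk : k ≤ 9) : (Nat.digitChar k).toNat = 48 + k := by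
  interval_cases k <;> rfl

lemma pvChr_lt {a b : Int} (ha : -1 ≤ a ∧ a ≤ 9) (hb : -1 ≤ b ∧ b ≤ 9) :
    (pvChr a < pvChr b) ↔ a < b := by
  have hlt : ∀ c d : Char, c < d ↔ c.toNat < d.toNat := by
    intro c d
    rfl
  unfold pvChr
  by_cases h1 : a < 0 <;> by_cases h2 : b < 0
  · simp [h1, h2]; omega
  · rw [if_pos h1, if_neg h2, hlt, pvDigitChar_toNat b.toNat (by omega)]
    show (45 < _ ↔ _)
    omega
  · rw [if_neg h1, if_pos h2, hlt, pvDigitChar_toNat a.toNat (by omega)]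
    show (_ < 45 ↔ _)
    omega
  · rw [if_neg h1, if_neg h2, hlt, pvDigitChar_toNat a.toNat (by omega),
      pvDigitChar_toNat b.toNat (by omega)]
    omega

lemma pvExC_chr {a b c : Int} (ha : -1 ≤ a ∧ a ≤ 9) (hb : -1 ≤ b ∧ b ≤ 9) (hc : -1 ≤ c ∧ c ≤ 9) :
    pvExC (pvChr a) (pvChr b) (pvChr c) = pvEx a b c := by
  have q1 : decide (pvChr a < pvChr b) = decide (a < b) := by
    rw [decide_eq_decide]; exact pvChr_lt ha hb
  have q2 : decide (pvChr c < pvChr b) = decide (c < b) := by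
    rw [decide_eq_decide]; exact pvChr_lt hc hb
  have q3 : decide (pvChr b < pvChr a) = decide (b < a) := by
    rw [decide_eq_decide]; exact pvChr_lt hb ha
  have q4 : decide (pvChr b < pvChr c) = decide (b < c) := by
    rw [decide_eq_decide]; exact pvChr_lt hb hc
  simp only [pvExC, pvEx, GT.gt, q1, q2, q3, q4]

lemma pvTri_map : ∀ l : List Int, (∀ d ∈ l, -1 ≤ d ∧ d ≤ 9) → pvTriC (l.map pvChr) = pvTriV l := by
  intro l
  induction l using pvTriV.induct with
  | case1 a b c t ih =>
    intro h
    have hmem : ∀ d ∈ b :: c :: t, -1 ≤ d ∧ d ≤ 9 := fun d hd => h d (by simp at hd ⊢; tauto)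
    have ha := h a (by simp)
    have hb := h b (by simp)
    have hc := h c (by simp)
    have ih' := ih hmem
    simp only [List.map_cons] at ih'
    simp only [List.map_cons, pvTriC, pvTriV]
    rw [pvExC_chr ha hb hc, ih']
  | case2 s hshape =>
    intro _
    match s, hshape with
    | [], _ => rfl
    | [a], _ => rfl
    | [a, b], _ => rfl
    | a :: b :: c :: t, h => exact absurd rfl (h a b c t)

-- appending one digit adds exactly the last triple
lemma pvTriV_snoc (u v w : Int) : ∀ (l : List Int),
    pvTriV (l ++ [u, v, w]) = pvTriV (l ++ [u, v]) + (if pvEx u v w then 1 else 0) := by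
  intro l
  induction l using pvTriV.induct with
  | case1 a b c t ih =>
    simp only [List.cons_append] at ih ⊢
    simp only [pvTriV]
    rw [ih]
    omega
  | case2 s hshape =>
    match s, hshape with
    | [], _ => simp only [List.nil_append]; simp [pvTriV]
    | [a], _ => simp only [List.cons_append, List.nil_append]; simp [pvTriV]
    | [a, b], _ => simp only [List.cons_append, List.nil_append]; simp [pvTriV]; omega
    | a :: b :: c :: t, h => exact absurd rfl (h a b c t)

lemma wavN_lt (n : Nat) (h : n < 100) : wavN n = 0 := by
  rw [wavN, if_pos h]

-- pvTriV over the digit list is wavN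
lemma pvTriV_digits : ∀ n : Nat, pvTriV (pvDigits n) = wavN n := by
  intro n
  induction n using Nat.strong_induction_on with
  | _ n ih =>
    by_cases h100 : n < 100
    · rw [wavN_lt n h100]
      rw [pvDigits]
      by_cases h10 : 10 ≤ n
      · rw [if_pos h10]
        have hd : pvDigits (n / 10) = [((n / 10 % 10 : Nat) : Int)] := by
          rw [pvDigits, if_neg (by omega)]
          simp
        rw [hd]
        rfl
      · rw [if_neg h10]
        rfl
    · have e0 : pvDigits n = pvDigits (n / 10) ++ [((n % 10 : Nat) : Int)] := by
        rw [pvDigits, if_pos (by omega)]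
      have e1 : pvDigits (n / 10) = pvDigits (n / 10 / 10) ++ [((n / 10 % 10 : Nat) : Int)] := by
        rw [pvDigits, if_pos (by omega)]
      have e2 : pvDigits (n / 10 / 10)
          = (if 10 ≤ n / 10 / 10 then pvDigits (n / 10 / 10 / 10) else [])
            ++ [((n / 10 / 10 % 10 : Nat) : Int)] := by
        rw [pvDigits]
      have hassoc : pvDigits n
          = ((if 10 ≤ n / 10 / 10 then pvDigits (n / 10 / 10 / 10) else [])
              ++ [((n / 10 / 10 % 10 : Nat) : Int), ((n / 10 % 10 : Nat) : Int),
                  ((n % 10 : Nat) : Int)]) := by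
        rw [e0, e1, e2]
        simp [List.append_assoc]
      rw [hassoc, pvTriV_snoc]
      have hback : (if 10 ≤ n / 10 / 10 then pvDigits (n / 10 / 10 / 10) else [])
          ++ [((n / 10 / 10 % 10 : Nat) : Int), ((n / 10 % 10 : Nat) : Int)]
          = pvDigits (n / 10) := by
        rw [e1, e2]
        simp [List.append_assoc]
      rw [hback, ih (n / 10) (by omega)]
      conv_rhs => rw [wavN]
      rw [if_neg h100]
      have hdd : n / 10 / 10 = n / 100 := by omega
      rw [hdd]
      omega

-- the per-element value of A's outer loop body
lemma pvPerX (acc x : Int) :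
    (let s := PySem.Int.toChars x
     if 3 ≤ (s.length : Int) then
       (PySem.List.pyRange 2 (s.length : Int) 1).foldl (fun ans j =>
         if (PySem.List.pyGetD s (j - 2) ' ' < PySem.List.pyGetD s (j - 1) ' ' ∧
               PySem.List.pyGetD s (j - 1) ' ' > PySem.List.pyGetD s j ' ') ∨
            (PySem.List.pyGetD s (j - 2) ' ' > PySem.List.pyGetD s (j - 1) ' ' ∧
               PySem.List.pyGetD s (j - 1) ' ' < PySem.List.pyGetD s j ' ')
         then ans + 1 else ans) acc
     else acc) = acc + (pvTriC (PySem.Int.toChars x) : Int) := by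
  set s := PySem.Int.toChars x with hs
  by_cases h3 : 3 ≤ (s.length : Int)
  · simp only [h3, if_pos]
    rw [PySem.List.foldl_ite_add_one
      (p := fun j => (PySem.List.pyGetD s (j - 2) ' ' < PySem.List.pyGetD s (j - 1) ' ' ∧
               PySem.List.pyGetD s (j - 1) ' ' > PySem.List.pyGetD s j ' ') ∨
            (PySem.List.pyGetD s (j - 2) ' ' > PySem.List.pyGetD s (j - 1) ' ' ∧
               PySem.List.pyGetD s (j - 1) ' ' < PySem.List.pyGetD s j ' '))]
    congr 1
    rw [← pvCountA s]
    norm_cast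
    apply List.countP_congr
    intro j _
    simp [pvP, pvExC, GT.gt]
  · simp only [h3]
    have : pvTriC s = 0 := by
      match hm : s with
      | [] => rfl
      | [a] => rfl
      | [a, b] => rfl
      | a :: b :: c :: t =>
        exfalso
        simp only [List.length_cons] at h3
        push_cast at h3
        omega
    rw [this]
    simp

-- A as a sum over the range
lemma pvA_sum (num1 num2 : Int) :
    totalWaviness num1 num2
      = ((PySem.List.pyRange num1 (num2 + 1) 1).map
          (fun x => (pvTriC (PySem.Int.toChars x) : Int))).sum := by
  unfold totalWaviness
  rw [PySem.List.foldl_congr_mem _ _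
    (fun acc x => acc + (pvTriC (PySem.Int.toChars x) : Int)) _
    (fun acc x _ => pvPerX acc x)]
  rw [PySem.List.foldl_add]
  simp

-- the per-element value of A, for -9 ≤ x, is wavN of its absolute part
lemma pvTriC_toChars (x : Int) (hx : -9 ≤ x) :
    (pvTriC (PySem.Int.toChars x) : Int) = (wavN x.toNat : Int) := by
  by_cases hneg : x < 0
  · have hd : pvDigits (-x).toNat = [(((-x).toNat % 10 : Nat) : Int)] := by
      rw [pvDigits, if_neg (by omega)]
      simp
    rw [pvToChars_eq, if_pos hneg, hd]
    have htn : x.toNat = 0 := Int.toNat_of_nonpos (by omega)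
    rw [htn, wavN_lt 0 (by omega)]
    rfl
  · rw [pvToChars_eq, if_neg hneg,
      pvTri_map _ (fun d hd => by have := pvDigits_mem x.toNat d hd; omega),
      pvTriV_digits]

-- ---- B-side ----

-- derivative of the closed-form counter
lemma pvBelow_succ (A M s w : Int) (hM : 0 < M) (hs : 0 ≤ s) (hw : 0 ≤ w)
    (hsw : s + w ≤ M) :
    pvBelow (A + 1) M s w
      = pvBelow A M s w + (if s ≤ A % M ∧ A % M < s + w then 1 else 0) := by
  unfold pvBelow
  simp only [PySem.Int.floordiv_eq_ediv_of_pos hM, PySem.Int.mod_eq_emod_of_pos hM]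
  have hdm := Int.mul_ediv_add_emod A M
  have hr0 : 0 ≤ A % M := Int.emod_nonneg A (ne_of_gt hM)
  have hrM : A % M < M := Int.emod_lt_of_pos A hM
  by_cases hc : A % M + 1 < M
  · have hA1 : A + 1 = (A % M + 1) + A / M * M := by linarith [hdm]
    have e1 : (A + 1) / M = A / M := by
      rw [hA1, Int.add_mul_ediv_right _ _ (ne_of_gt hM),
        Int.ediv_eq_zero_of_lt (by omega) hc]
      ring
    have e2 : (A + 1) % M = A % M + 1 := by
      rw [hA1]
      have h1 : (A % M + 1 + A / M * M) % M = (A % M + 1) % M := by simp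
      rw [h1, Int.emod_eq_of_lt (by omega) hc]
    have hmin : min (max (A % M + 1 - s) 0) w
        = min (max (A % M - s) 0) w + (if s ≤ A % M ∧ A % M < s + w then 1 else 0) := by
      split_ifs with hi <;> omega
    rw [e1, e2, hmin]
    ring
  · have hc' : A % M + 1 = M := by omega
    have hA1 : A + 1 = (A / M + 1) * M := by
      have hx : (A / M + 1) * M = A / M * M + M := by ring
      linarith [hdm, hx]
    have e1 : (A + 1) / M = A / M + 1 := by
      rw [hA1, Int.mul_ediv_cancel _ (ne_of_gt hM)]
    have e2 : (A + 1) % M = 0 := by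
      rw [hA1, Int.mul_emod_left]
    have hmin1 : min (max ((0 : Int) - s) 0) w = 0 := by omega
    have hmin2 : min (max (A % M - s) 0) w + (if s ≤ A % M ∧ A % M < s + w then 1 else 0)
        = w := by
      split_ifs with hi <;> omega
    rw [e1, e2, hmin1, add_assoc, hmin2]
    ring

-- telescoping: the counter counts residues over a range
lemma pvBelow_count (M s w : Int) (hM : 0 < M) (hs : 0 ≤ s) (hw : 0 ≤ w) (hsw : s + w ≤ M) :
    ∀ (n : Nat) (a b : Int), (b - a).toNat = n → 0 ≤ a → a ≤ b →
    pvBelow b M s w - pvBelow a M s w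
      = ((PySem.List.pyRange a b 1).map
          (fun x => if s ≤ x % M ∧ x % M < s + w then (1 : Int) else 0)).sum := by
  intro n
  induction n with
  | zero =>
    intro a b h0 ha hab
    rw [PySem.List.pyRange_one_eq_nil (by omega : b ≤ a)]
    have : pvBelow b M s w = pvBelow a M s w := by
      have hba : b = a := by omega
      rw [hba]
    rw [this]
    simp
  | succ n ih =>
    intro a b h0 ha hab
    have hlt : a < b := by omega
    rw [PySem.List.pyRange_one_cons hlt]
    simp only [List.map_cons, List.sum_cons]
    rw [← ih (a + 1) b (by omega) (by omega) (by omega)]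
    have hstep := pvBelow_succ a M s w hM hs hw hsw
    by_cases hi : s ≤ a % M ∧ a % M < s + w
    · simp only [if_pos hi] at hstep ⊢
      omega
    · simp only [if_neg hi] at hstep ⊢
      omega

-- a sum whose terms vanish except possibly at one member
lemma pvSum_single : ∀ (L : List Int), L.Nodup → ∀ (m0 : Int) (f : Int → Int),
    (∀ m ∈ L, m ≠ m0 → f m = 0) → (L.map f).sum = if m0 ∈ L then f m0 else 0 := by
  intro L
  induction L with
  | nil => intro _ m0 f _; simp
  | cons a L ih =>
    intro hnd m0 f hvan
    have hndL := (List.nodup_cons.mp hnd).2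
    have hanotin := (List.nodup_cons.mp hnd).1
    simp only [List.map_cons, List.sum_cons]
    rw [ih hndL m0 f (fun m hm hne => hvan m (List.mem_cons_of_mem _ hm) hne)]
    by_cases haeq : a = m0
    · subst haeq
      rw [if_neg hanotin, if_pos (List.mem_cons_self)]
      ring
    · rw [hvan a List.mem_cons_self haeq]
      have hmem : (m0 ∈ a :: L) ↔ m0 ∈ L := by
        constructor
        · intro h
          rcases List.mem_cons.mp h with h1 | h1
          · exact absurd h1.symm haeq
          · exact h1
        · exact List.mem_cons_of_mem a
      by_cases hm : m0 ∈ L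
      · rw [if_pos hm, if_pos (hmem.mpr hm)]; ring
      · rw [if_neg hm, if_neg (fun h => hm (hmem.mp h))]; ring

-- swapping two list sums
lemma pvSum_comm (L1 L2 : List Int) (g : Int → Int → Int) :
    (L1.map (fun m => (L2.map (fun x => g m x)).sum)).sum
      = (L2.map (fun x => (L1.map (fun m => g m x)).sum)).sum := by
  induction L1 with
  | nil => simp
  | cons m L1 ih =>
    simp only [List.map_cons, List.sum_cons, ih]
    rw [← PySem.List.sum_map_add_int]

-- one step of wavN, as an Int-valued term
def pvStep (x : Int) (k : Nat) : Int :=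
  if 100 ≤ x.toNat / 10 ^ k then
    (if pvEx ((x.toNat / 10 ^ k / 100 % 10 : Nat) : Int) ((x.toNat / 10 ^ k / 10 % 10 : Nat) : Int)
          ((x.toNat / 10 ^ k % 10 : Nat) : Int) then 1 else 0)
  else 0

lemma wavN_step (n : Nat) :
    (wavN n : Int)
      = (if 100 ≤ n then
          (if pvEx ((n / 100 % 10 : Nat) : Int) ((n / 10 % 10 : Nat) : Int)
              ((n % 10 : Nat) : Int) then (1 : Int) else 0)
         else 0) + (wavN (n / 10) : Int) := by
  by_cases h : n < 100
  · rw [wavN_lt n h, wavN_lt (n / 10) (by omega), if_neg (by omega)]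
    simp
  · conv_lhs => rw [wavN]
    rw [if_neg h, if_pos (by omega : 100 ≤ n), Nat.cast_add]
    congr 1
    split_ifs <;> simp

lemma pvS_split (num1 num2 : Int) (k : Nat) :
    pvS num1 num2 k
      = ((PySem.List.pyRange num1 (num2 + 1) 1).map (fun x => pvStep x k)).sum
        + pvS num1 num2 (k + 1) := by
  unfold pvS
  rw [← PySem.List.sum_map_add_int]
  refine congrArg _ (List.map_congr_left fun x hx => ?_)
  rw [wavN_step (x.toNat / 10 ^ k)]
  have hstep : (if 100 ≤ x.toNat / 10 ^ k then
          (if pvEx ((x.toNat / 10 ^ k / 100 % 10 : Nat) : Int)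
              ((x.toNat / 10 ^ k / 10 % 10 : Nat) : Int)
              ((x.toNat / 10 ^ k % 10 : Nat) : Int) then (1 : Int) else 0)
         else 0) = pvStep x k := by
    rw [pvStep]
  rw [hstep]
  have hdd : x.toNat / 10 ^ k / 10 = x.toNat / 10 ^ (k + 1) := by
    rw [Nat.div_div_eq_div_mul, ← pow_succ]
  rw [hdd]

lemma pvS_vanish (num1 num2 : Int) (k : Nat) (h : num2 < (10 : Int) ^ (k + 2)) :
    pvS num1 num2 k = 0 := by
  unfold pvS
  apply List.sum_eq_zero
  intro y hy
  simp only [List.mem_map] at hy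
  obtain ⟨x, hx, rfl⟩ := hy
  have hxlt : x < num2 + 1 := (PySem.List.mem_pyRange_one.mp hx).2
  have hlt : x.toNat / 10 ^ k < 100 := by
    by_cases hx0 : x ≤ 0
    · rw [Int.toNat_of_nonpos hx0, Nat.zero_div]
      omega
    · have hcast : ((10 ^ (k + 2) : Nat) : Int) = (10 : Int) ^ (k + 2) := by push_cast; rfl
      have hxn : x.toNat < 10 ^ (k + 2) := by
        have : (x.toNat : Int) < ((10 ^ (k + 2) : Nat) : Int) := by
          rw [hcast, Int.toNat_of_nonneg (by omega)]
          omega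
        exact_mod_cast this
      rw [Nat.div_lt_iff_lt_mul (Nat.pow_pos (by omega))]
      calc x.toNat < 10 ^ (k + 2) := hxn
        _ = 100 * 10 ^ k := by rw [pow_add]; ring
  rw [wavN_lt _ hlt]
  rfl

-- a number below the window's place value contributes nothing at that window
lemma pvStep_zero (k : Nat) (x : Int) (h : x < (10 : Int) ^ (k + 2)) : pvStep x k = 0 := by
  have hnot : ¬ 100 ≤ x.toNat / 10 ^ k := by
    by_cases hx0 : x ≤ 0
    · rw [Int.toNat_of_nonpos hx0, Nat.zero_div]
      omega
    · have hxn : x.toNat < 10 ^ (k + 2) := by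
        have hcast : ((10 ^ (k + 2) : Nat) : Int) = (10 : Int) ^ (k + 2) := by push_cast; rfl
        have hlt : (x.toNat : Int) < ((10 ^ (k + 2) : Nat) : Int) := by
          rw [hcast, Int.toNat_of_nonneg (by omega)]
          exact h
        exact_mod_cast hlt
      have hdiv : x.toNat / 10 ^ k < 100 := by
        rw [Nat.div_lt_iff_lt_mul (Nat.pow_pos (by omega))]
        calc x.toNat < 10 ^ (k + 2) := hxn
          _ = 100 * 10 ^ k := by rw [pow_add]; ring
      omega
  rw [pvStep, if_neg hnot]

-- collapsing the 1000-pattern row of one number x carrying the window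
lemma pvRow_eq (k : Nat) (x : Int) (hx : (10 : Int) ^ (k + 2) ≤ x) :
    ((PySem.List.pyRange 0 1000 1).map (fun m =>
      if (PySem.Int.floordiv m 100 < PySem.Int.mod (PySem.Int.floordiv m 10) 10 ∧
          PySem.Int.mod (PySem.Int.floordiv m 10) 10 > PySem.Int.mod m 10) ∨
         (PySem.Int.floordiv m 100 > PySem.Int.mod (PySem.Int.floordiv m 10) 10 ∧
          PySem.Int.mod (PySem.Int.floordiv m 10) 10 < PySem.Int.mod m 10)
      then (if m * (10 : Int) ^ k ≤ x % ((10 : Int) ^ (k + 2) * 10) ∧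
              x % ((10 : Int) ^ (k + 2) * 10) < m * (10 : Int) ^ k + (10 : Int) ^ k
            then (1 : Int) else 0)
      else 0)).sum = pvStep x k := by
  have hp : (0 : Nat) < 10 ^ k := Nat.pow_pos (by omega)
  have hx0 : (0 : Int) < x := lt_of_lt_of_le (by positivity) hx
  set n := x.toNat with hn
  have hxn : (n : Int) = x := Int.toNat_of_nonneg (by omega)
  have hMcast : (10 : Int) ^ (k + 2) * 10 = ((10 ^ k * 1000 : Nat) : Int) := by
    push_cast
    ring
  have hmod : x % ((10 : Int) ^ (k + 2) * 10) = ((n % (10 ^ k * 1000) : Nat) : Int) := by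
    conv_lhs => rw [← hxn, hMcast]
    norm_cast
  have hsplit := Nat.div_add_mod (n % (10 ^ k * 1000)) (10 ^ k)
  have hdivmn : n % (10 ^ k * 1000) / 10 ^ k = n / 10 ^ k % 1000 :=
    Nat.mod_mul_right_div_self n (10 ^ k) 1000
  have hmodlt : n % (10 ^ k * 1000) % 10 ^ k < 10 ^ k := Nat.mod_lt _ hp
  have hmnlt : n / 10 ^ k % 1000 < 1000 := Nat.mod_lt _ (by omega)
  have hm0mem : ((n / 10 ^ k % 1000 : Nat) : Int) ∈ PySem.List.pyRange 0 1000 1 :=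
    PySem.List.mem_pyRange_one.mpr ⟨by positivity, by exact_mod_cast hmnlt⟩
  have hpowcast : ((10 ^ k : Nat) : Int) = (10 : Int) ^ k := by push_cast; rfl
  have hvan : ∀ m ∈ PySem.List.pyRange 0 1000 1, m ≠ ((n / 10 ^ k % 1000 : Nat) : Int) →
      (if (PySem.Int.floordiv m 100 < PySem.Int.mod (PySem.Int.floordiv m 10) 10 ∧
          PySem.Int.mod (PySem.Int.floordiv m 10) 10 > PySem.Int.mod m 10) ∨
         (PySem.Int.floordiv m 100 > PySem.Int.mod (PySem.Int.floordiv m 10) 10 ∧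
          PySem.Int.mod (PySem.Int.floordiv m 10) 10 < PySem.Int.mod m 10)
       then (if m * (10 : Int) ^ k ≤ x % ((10 : Int) ^ (k + 2) * 10) ∧
              x % ((10 : Int) ^ (k + 2) * 10) < m * (10 : Int) ^ k + (10 : Int) ^ k
             then (1 : Int) else 0)
       else 0) = 0 := by
    intro m hm hne
    have hmb := PySem.List.mem_pyRange_one.mp hm
    have hind : ¬ (m * (10 : Int) ^ k ≤ x % ((10 : Int) ^ (k + 2) * 10) ∧
              x % ((10 : Int) ^ (k + 2) * 10) < m * (10 : Int) ^ k + (10 : Int) ^ k) := by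
      rintro ⟨h1, h2⟩
      apply hne
      rw [hmod] at h1 h2
      have hm' : ((m.toNat : Nat) : Int) = m := Int.toNat_of_nonneg hmb.1
      rw [← hm', ← hpowcast] at h1 h2
      have h1' : m.toNat * 10 ^ k ≤ n % (10 ^ k * 1000) := by exact_mod_cast h1
      have h2' : n % (10 ^ k * 1000) < m.toNat * 10 ^ k + 10 ^ k := by exact_mod_cast h2
      have hdeq : n % (10 ^ k * 1000) / 10 ^ k = m.toNat := by
        apply Nat.div_eq_of_lt_le h1'
        rw [Nat.succ_mul]
        exact h2'
      rw [← hm', ← hdivmn, hdeq]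
    rw [if_neg hind]
    split_ifs <;> rfl
  rw [pvSum_single _ (PySem.List.nodup_pyRange_one 0 1000) _ _ hvan, if_pos hm0mem]
  have hcomm := Nat.mul_comm (10 ^ k) (n % (10 ^ k * 1000) / 10 ^ k)
  have hindpos : (((n / 10 ^ k % 1000 : Nat) : Int) * (10 : Int) ^ k
        ≤ x % ((10 : Int) ^ (k + 2) * 10) ∧
      x % ((10 : Int) ^ (k + 2) * 10)
        < ((n / 10 ^ k % 1000 : Nat) : Int) * (10 : Int) ^ k + (10 : Int) ^ k) := by
    rw [hmod, ← hpowcast]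
    constructor
    · have hle : (n / 10 ^ k % 1000) * 10 ^ k ≤ n % (10 ^ k * 1000) := by
        rw [← hdivmn]
        exact Nat.div_mul_le_self _ _
      exact_mod_cast hle
    · have hlt2 : n % (10 ^ k * 1000) < (n / 10 ^ k % 1000) * 10 ^ k + 10 ^ k := by
        rw [← hdivmn]
        omega
      exact_mod_cast hlt2
  rw [if_pos hindpos]
  have h100 : 100 ≤ n / 10 ^ k := by
    rw [Nat.le_div_iff_mul_le hp]
    have hnge : (10 : Nat) ^ (k + 2) ≤ n := by
      have hle2 : ((10 ^ (k + 2) : Nat) : Int) ≤ (n : Int) := by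
        rw [hxn]
        calc ((10 ^ (k + 2) : Nat) : Int) = (10 : Int) ^ (k + 2) := by push_cast; rfl
          _ ≤ x := hx
      exact_mod_cast hle2
    calc 100 * 10 ^ k = 10 ^ (k + 2) := by rw [pow_add]; ring
      _ ≤ n := hnge
  rw [pvStep, ← hn, if_pos h100]
  have d2 : n / 10 ^ k % 1000 / 100 = n / 10 ^ k / 100 % 10 := by
    rw [show (1000 : Nat) = 100 * 10 from rfl]
    exact Nat.mod_mul_right_div_self _ _ _
  have d1 : n / 10 ^ k % 1000 / 10 % 10 = n / 10 ^ k / 10 % 10 := by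
    rw [show (1000 : Nat) = 10 * 100 from rfl, Nat.mod_mul_right_div_self]
    exact Nat.mod_mod_of_dvd _ (by norm_num)
  have d0 : n / 10 ^ k % 1000 % 10 = n / 10 ^ k % 10 :=
    Nat.mod_mod_of_dvd _ (by norm_num)
  have e2 : PySem.Int.floordiv ((n / 10 ^ k % 1000 : Nat) : Int) 100
      = ((n / 10 ^ k % 1000 / 100 : Nat) : Int) := by
    exact_mod_cast PySem.Int.floordiv_natCast (n / 10 ^ k % 1000) 100
  have e10 : PySem.Int.floordiv ((n / 10 ^ k % 1000 : Nat) : Int) 10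
      = ((n / 10 ^ k % 1000 / 10 : Nat) : Int) := by
    exact_mod_cast PySem.Int.floordiv_natCast (n / 10 ^ k % 1000) 10
  have em1 : PySem.Int.mod ((n / 10 ^ k % 1000 / 10 : Nat) : Int) 10
      = ((n / 10 ^ k % 1000 / 10 % 10 : Nat) : Int) := by
    exact_mod_cast PySem.Int.mod_natCast (n / 10 ^ k % 1000 / 10) 10
  have em0 : PySem.Int.mod ((n / 10 ^ k % 1000 : Nat) : Int) 10
      = ((n / 10 ^ k % 1000 % 10 : Nat) : Int) := by
    exact_mod_cast PySem.Int.mod_natCast (n / 10 ^ k % 1000) 10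
  rw [e2, e10, em1, em0, d2, d1, d0]
  have hiff : ((((n / 10 ^ k / 100 % 10 : Nat) : Int) < ((n / 10 ^ k / 10 % 10 : Nat) : Int) ∧
        ((n / 10 ^ k / 10 % 10 : Nat) : Int) > ((n / 10 ^ k % 10 : Nat) : Int)) ∨
      (((n / 10 ^ k / 100 % 10 : Nat) : Int) > ((n / 10 ^ k / 10 % 10 : Nat) : Int) ∧
        ((n / 10 ^ k / 10 % 10 : Nat) : Int) < ((n / 10 ^ k % 10 : Nat) : Int)))
      ↔ (pvEx ((n / 10 ^ k / 100 % 10 : Nat) : Int) ((n / 10 ^ k / 10 % 10 : Nat) : Int)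
          ((n / 10 ^ k % 10 : Nat) : Int) = true) := by
    simp [pvEx, GT.gt]
  exact if_congr hiff rfl rfl

-- the inner for-loop over the 1000 patterns
set_option maxRecDepth 8000 in
lemma pvBlock_eq (num1 num2 : Int) (k : Nat) (total : Int)
    (hlo : max num1 ((10 : Int) ^ (k + 2)) ≤ num2) :
    (PySem.List.pyRange 0 1000 1).foldl (fun t m =>
      if (PySem.Int.floordiv m 100 < PySem.Int.mod (PySem.Int.floordiv m 10) 10 ∧
          PySem.Int.mod (PySem.Int.floordiv m 10) 10 > PySem.Int.mod m 10) ∨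
         (PySem.Int.floordiv m 100 > PySem.Int.mod (PySem.Int.floordiv m 10) 10 ∧
          PySem.Int.mod (PySem.Int.floordiv m 10) 10 < PySem.Int.mod m 10)
      then t + (pvBelow (num2 + 1) ((10 : Int) ^ (k + 2) * 10) (m * PySem.Int.floordiv ((10 : Int) ^ (k + 2)) 100) (PySem.Int.floordiv ((10 : Int) ^ (k + 2)) 100)
                - pvBelow (max num1 ((10 : Int) ^ (k + 2))) ((10 : Int) ^ (k + 2) * 10) (m * PySem.Int.floordiv ((10 : Int) ^ (k + 2)) 100) (PySem.Int.floordiv ((10 : Int) ^ (k + 2)) 100))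
      else t) total
    = total + ((PySem.List.pyRange num1 (num2 + 1) 1).map (fun x => pvStep x k)).sum := by
  have hbpos : (0 : Int) < (10 : Int) ^ (k + 2) := by positivity
  have hu : PySem.Int.floordiv ((10 : Int) ^ (k + 2)) 100 = (10 : Int) ^ k := by
    rw [PySem.Int.floordiv_eq_ediv_of_pos (by norm_num : (0 : Int) < 100), pow_add,
      show ((10 : Int) ^ 2) = 100 from by norm_num]
    exact Int.mul_ediv_cancel _ (by norm_num)
  simp only [hu]
  rw [PySem.List.foldl_congr_mem _ _
      (fun t m => t +
        (if (PySem.Int.floordiv m 100 < PySem.Int.mod (PySem.Int.floordiv m 10) 10 ∧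
          PySem.Int.mod (PySem.Int.floordiv m 10) 10 > PySem.Int.mod m 10) ∨
         (PySem.Int.floordiv m 100 > PySem.Int.mod (PySem.Int.floordiv m 10) 10 ∧
          PySem.Int.mod (PySem.Int.floordiv m 10) 10 < PySem.Int.mod m 10)
         then pvBelow (num2 + 1) ((10 : Int) ^ (k + 2) * 10) (m * (10 : Int) ^ k) ((10 : Int) ^ k)
              - pvBelow (max num1 ((10 : Int) ^ (k + 2))) ((10 : Int) ^ (k + 2) * 10)
                  (m * (10 : Int) ^ k) ((10 : Int) ^ k)
         else 0)) _
      (fun t m _ => by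
        by_cases h1 : (PySem.Int.floordiv m 100 < PySem.Int.mod (PySem.Int.floordiv m 10) 10 ∧
          PySem.Int.mod (PySem.Int.floordiv m 10) 10 > PySem.Int.mod m 10) ∨
         (PySem.Int.floordiv m 100 > PySem.Int.mod (PySem.Int.floordiv m 10) 10 ∧
          PySem.Int.mod (PySem.Int.floordiv m 10) 10 < PySem.Int.mod m 10)
        · simp only [if_pos h1]
        · simp only [if_neg h1]
          ring)]
  rw [PySem.List.foldl_add]
  congr 1
  have hM1000 : (10 : Int) ^ (k + 2) * 10 = (10 : Int) ^ k * 1000 := by rw [pow_add]; ring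
  have hrow : ∀ m ∈ PySem.List.pyRange 0 1000 1,
      (if (PySem.Int.floordiv m 100 < PySem.Int.mod (PySem.Int.floordiv m 10) 10 ∧
          PySem.Int.mod (PySem.Int.floordiv m 10) 10 > PySem.Int.mod m 10) ∨
         (PySem.Int.floordiv m 100 > PySem.Int.mod (PySem.Int.floordiv m 10) 10 ∧
          PySem.Int.mod (PySem.Int.floordiv m 10) 10 < PySem.Int.mod m 10)
       then pvBelow (num2 + 1) ((10 : Int) ^ (k + 2) * 10) (m * (10 : Int) ^ k) ((10 : Int) ^ k)
            - pvBelow (max num1 ((10 : Int) ^ (k + 2))) ((10 : Int) ^ (k + 2) * 10)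
                (m * (10 : Int) ^ k) ((10 : Int) ^ k)
       else 0)
        = ((PySem.List.pyRange (max num1 ((10 : Int) ^ (k + 2))) (num2 + 1) 1).map
            (fun x => if (PySem.Int.floordiv m 100 < PySem.Int.mod (PySem.Int.floordiv m 10) 10 ∧
          PySem.Int.mod (PySem.Int.floordiv m 10) 10 > PySem.Int.mod m 10) ∨
         (PySem.Int.floordiv m 100 > PySem.Int.mod (PySem.Int.floordiv m 10) 10 ∧
          PySem.Int.mod (PySem.Int.floordiv m 10) 10 < PySem.Int.mod m 10)
              then (if m * (10 : Int) ^ k ≤ x % ((10 : Int) ^ (k + 2) * 10) ∧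
              x % ((10 : Int) ^ (k + 2) * 10) < m * (10 : Int) ^ k + (10 : Int) ^ k
                    then (1 : Int) else 0) else 0)).sum := by
    intro m hm
    have hmb := PySem.List.mem_pyRange_one.mp hm
    by_cases hwv : (PySem.Int.floordiv m 100 < PySem.Int.mod (PySem.Int.floordiv m 10) 10 ∧
          PySem.Int.mod (PySem.Int.floordiv m 10) 10 > PySem.Int.mod m 10) ∨
         (PySem.Int.floordiv m 100 > PySem.Int.mod (PySem.Int.floordiv m 10) 10 ∧
          PySem.Int.mod (PySem.Int.floordiv m 10) 10 < PySem.Int.mod m 10)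
    · rw [if_pos hwv]
      simp only [if_pos hwv]
      exact pvBelow_count ((10 : Int) ^ (k + 2) * 10) (m * (10 : Int) ^ k) ((10 : Int) ^ k)
        (by positivity) (mul_nonneg hmb.1 (by positivity)) (by positivity)
        (by rw [hM1000]
            have h2 : (m + 1) * (10 : Int) ^ k ≤ 1000 * (10 : Int) ^ k :=
              mul_le_mul_of_nonneg_right (by omega) (by positivity)
            linarith [h2])
        ((num2 + 1 - max num1 ((10 : Int) ^ (k + 2))).toNat)
        (max num1 ((10 : Int) ^ (k + 2))) (num2 + 1)
        rfl (le_trans (le_of_lt hbpos) (le_max_right _ _)) (by omega)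
    · rw [if_neg hwv]
      simp only [if_neg hwv]
      simp
  rw [List.map_congr_left hrow,
    pvSum_comm (PySem.List.pyRange 0 1000 1)
      (PySem.List.pyRange (max num1 ((10 : Int) ^ (k + 2))) (num2 + 1) 1)
      (fun m x => if (PySem.Int.floordiv m 100 < PySem.Int.mod (PySem.Int.floordiv m 10) 10 ∧
          PySem.Int.mod (PySem.Int.floordiv m 10) 10 > PySem.Int.mod m 10) ∨
         (PySem.Int.floordiv m 100 > PySem.Int.mod (PySem.Int.floordiv m 10) 10 ∧
          PySem.Int.mod (PySem.Int.floordiv m 10) 10 < PySem.Int.mod m 10)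
        then (if m * (10 : Int) ^ k ≤ x % ((10 : Int) ^ (k + 2) * 10) ∧
              x % ((10 : Int) ^ (k + 2) * 10) < m * (10 : Int) ^ k + (10 : Int) ^ k
              then (1 : Int) else 0) else 0)]
  have hxrow : ∀ x ∈ PySem.List.pyRange (max num1 ((10 : Int) ^ (k + 2))) (num2 + 1) 1,
      ((PySem.List.pyRange 0 1000 1).map (fun m =>
        if (PySem.Int.floordiv m 100 < PySem.Int.mod (PySem.Int.floordiv m 10) 10 ∧
          PySem.Int.mod (PySem.Int.floordiv m 10) 10 > PySem.Int.mod m 10) ∨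
         (PySem.Int.floordiv m 100 > PySem.Int.mod (PySem.Int.floordiv m 10) 10 ∧
          PySem.Int.mod (PySem.Int.floordiv m 10) 10 < PySem.Int.mod m 10)
        then (if m * (10 : Int) ^ k ≤ x % ((10 : Int) ^ (k + 2) * 10) ∧
              x % ((10 : Int) ^ (k + 2) * 10) < m * (10 : Int) ^ k + (10 : Int) ^ k
              then (1 : Int) else 0) else 0)).sum = pvStep x k := by
    intro x hxm
    exact pvRow_eq k x (le_trans (le_max_right _ _) (PySem.List.mem_pyRange_one.mp hxm).1)
  rw [List.map_congr_left hxrow]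
  conv_rhs => rw [PySem.List.pyRange_one_append num1 (max num1 ((10 : Int) ^ (k + 2))) (num2 + 1)
    (le_max_left _ _) (by omega)]
  rw [List.map_append, List.sum_append]
  have hzero : ((PySem.List.pyRange num1 (max num1 ((10 : Int) ^ (k + 2))) 1).map
      (fun x => pvStep x k)).sum = 0 := by
    apply List.sum_eq_zero
    intro y hy
    simp only [List.mem_map] at hy
    obtain ⟨x, hxm, rfl⟩ := hy
    have hb := PySem.List.mem_pyRange_one.mp hxm
    apply pvStep_zero
    omega
  rw [hzero, zero_add]

-- the main loop computes the per-window sums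
lemma pvLoopB_eq (num1 num2 : Int) : ∀ (fuel k : Nat) (total : Int),
    num2 < (10 : Int) ^ (k + 2 + fuel) →
    pvLoopB num1 num2 fuel ((10 : Int) ^ (k + 2)) total = total + pvS num1 num2 k := by
  intro fuel
  induction fuel with
  | zero =>
    intro k total h
    simp only [pvLoopB]
    rw [pvS_vanish num1 num2 k (by simpa using h)]
    ring
  | succ fuel ih =>
    intro k total h
    have h10 : (10 : Int) ^ (k + 2) * 10 = (10 : Int) ^ (k + 1 + 2) := by
      rw [← pow_succ]
    have hbound : num2 < (10 : Int) ^ (k + 1 + 2 + fuel) := by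
      have he : k + 1 + 2 + fuel = k + 2 + (fuel + 1) := by omega
      rw [he]
      exact h
    by_cases hb : (10 : Int) ^ (k + 2) ≤ num2
    · by_cases hlo : max num1 ((10 : Int) ^ (k + 2)) ≤ num2
      · have hstep : pvLoopB num1 num2 (fuel + 1) ((10 : Int) ^ (k + 2)) total
            = pvLoopB num1 num2 fuel ((10 : Int) ^ (k + 2) * 10)
              (total + ((PySem.List.pyRange num1 (num2 + 1) 1).map (fun x => pvStep x k)).sum) := by
          simp only [pvLoopB]
          rw [if_pos hb, if_pos hlo, pvBlock_eq num1 num2 k total hlo]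
        rw [hstep, h10, ih (k + 1) _ hbound, pvS_split num1 num2 k]
        ring
      · have hemp : num2 + 1 ≤ num1 := by omega
        have hstep : pvLoopB num1 num2 (fuel + 1) ((10 : Int) ^ (k + 2)) total
            = pvLoopB num1 num2 fuel ((10 : Int) ^ (k + 2) * 10) total := by
          simp only [pvLoopB]
          rw [if_pos hb, if_neg hlo]
        rw [hstep, h10, ih (k + 1) total hbound]
        have hnil : PySem.List.pyRange num1 (num2 + 1) 1 = [] :=
          PySem.List.pyRange_one_eq_nil hemp
        have hS1 : pvS num1 num2 (k + 1) = 0 := by unfold pvS; rw [hnil]; rfl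
        have hS0 : pvS num1 num2 k = 0 := by unfold pvS; rw [hnil]; rfl
        rw [hS1, hS0]
    · have hstep : pvLoopB num1 num2 (fuel + 1) ((10 : Int) ^ (k + 2)) total = total := by
        simp only [pvLoopB]
        rw [if_neg hb]
      rw [hstep, pvS_vanish num1 num2 k (by omega)]
      ring

-- ===== VERDICT (by name: the statement is the Claim_ definition above) =====
theorem totalWaviness_spec : Claim_equal_totalWaviness := by
  intro num1 num2 hdom hpre
  unfold Spec_totalWaviness totalWaviness_alt
  have hd2 : num2 ≤ 2147483648 := by
    unfold Dom_totalWaviness pvDomInt at hdom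
    simp only [Bool.and_eq_true, decide_eq_true_eq] at hdom
    exact hdom.2.2
  have hB : pvLoopB num1 num2 64 100 0 = pvS num1 num2 0 := by
    have h100 : (100 : Int) = (10 : Int) ^ (0 + 2) := by norm_num
    rw [h100, pvLoopB_eq num1 num2 64 0 0 (lt_of_le_of_lt hd2 (by norm_num))]
    ring
  rw [hB, pvA_sum]
  unfold pvS
  simp only [pow_zero, Nat.div_one]
  rcases hpre with h9 | hemp
  · refine congrArg _ (List.map_congr_left fun x hxm => ?_)
    exact pvTriC_toChars x (le_trans h9 (PySem.List.mem_pyRange_one.mp hxm).1)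
  · rw [PySem.List.pyRange_one_eq_nil (by omega)]
    rfl
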